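-- pv_equiv track=rewrite | github.com/batsnap/botjarvis | func.py | chif
-- ===== SOURCE A (Python) =====
-- def chif(s):
--     chifri='0123456789+-'
--     itog=''
--     for i in range(len(s)):
--         if s[i] in chifri:
--             itog+=s[i]
--         if s[i]==',' or s[i]=='.':
--             itog+='.'
--     return itog
-- ===== SOURCE B (Python) =====
-- import re
--
-- def chif(s):
--     return re.sub(r'[^0-9+\-.,]', '', s).replace(',', '.')
-- ===== Notes on version B (the rewrite author's own statement) =====
-- stated objective: idiomatic
-- what changed: Replaced the per-character index loop with string accumulation by two whole-string passes: a regex substitution that drops every character outside the allowed sign/digit/separator class, then a replace pass normalizing the comma separator to a dot.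
import Mathlib
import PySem

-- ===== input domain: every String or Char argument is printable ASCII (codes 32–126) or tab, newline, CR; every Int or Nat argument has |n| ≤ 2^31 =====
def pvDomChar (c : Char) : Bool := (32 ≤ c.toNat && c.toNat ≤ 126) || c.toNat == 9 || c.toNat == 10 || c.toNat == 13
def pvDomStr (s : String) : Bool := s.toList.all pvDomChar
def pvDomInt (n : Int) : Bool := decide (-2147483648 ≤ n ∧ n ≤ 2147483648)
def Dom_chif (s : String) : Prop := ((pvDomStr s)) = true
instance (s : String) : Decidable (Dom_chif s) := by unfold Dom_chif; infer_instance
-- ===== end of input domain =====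

-- B replaces A's per-character branching loop by two whole-string passes: filter the allowed class, then map ',' to '.' (idiomatic).

-- ===== PORT A =====
-- literal port of A's loop: per character, append it if in '0123456789+-', append '.' if ',' or '.'
def chif (s : String) : String :=
  String.ofList (s.toList.foldl (fun itog c =>
    (itog ++ (if c ∈ "0123456789+-".toList then [c] else [])) ++
      (if c = ',' ∨ c = '.' then ['.'] else [])) [])

-- ===== PORT B =====
-- port of B: re.sub drops chars outside [0-9+\-.,] (a filter pass), then replace ',' '.' (a map pass)
def chif_alt (s : String) : String :=
  String.ofList (((s.toList.filter (fun c => c ∈ "0123456789+-.,".toList)).map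
    (fun c => if c = ',' then '.' else c)))

-- ===== PRECONDITION & SPEC =====
def Spec_chif (s : String) (out : String) : Prop := out = chif_alt s
instance (s : String) (out : String) : Decidable (Spec_chif s out) := by unfold Spec_chif; infer_instance

-- ===== CLAIM (what is proved, stated in full; the proofs are below) =====
def Claim_equal_chif : Prop := ∀ (s : String), Dom_chif s → Spec_chif s (chif s)

-- ===== LEMMAS AND PROOFS =====

-- what A's loop body appends for one character equals what B's filter+map keeps for it
theorem chif_step (c : Char) :
    (if c ∈ "0123456789+-".toList then [c] else []) ++
      (if c = ',' ∨ c = '.' then ['.'] else []) =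
    (if c ∈ "0123456789+-.,".toList then [if c = ',' then '.' else c] else []) := by
  simp only [show "0123456789+-".toList =
      ['0','1','2','3','4','5','6','7','8','9','+','-'] from rfl,
    show "0123456789+-.,".toList =
      ['0','1','2','3','4','5','6','7','8','9','+','-','.',','] from rfl,
    List.mem_cons, List.not_mem_nil, or_false]
  by_cases h0 : c = ',' <;> by_cases h1 : c = '.' <;> simp_all

theorem chif_step' (c : Char) (m : List Char) :
    (if c ∈ "0123456789+-".toList then [c] else []) ++
      ((if c = ',' ∨ c = '.' then ['.'] else []) ++ m) =
    (if c ∈ "0123456789+-.,".toList then [if c = ',' then '.' else c] else []) ++ m := by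
  rw [← List.append_assoc, chif_step]

theorem chif_fold (l : List Char) (acc : List Char) :
    l.foldl (fun itog c =>
      (itog ++ (if c ∈ "0123456789+-".toList then [c] else [])) ++
        (if c = ',' ∨ c = '.' then ['.'] else [])) acc =
    acc ++ (l.filter (fun c => c ∈ "0123456789+-.,".toList)).map
      (fun c => if c = ',' then '.' else c) := by
  induction l generalizing acc with
  | nil => simp
  | cons c t ih =>
    rw [List.foldl_cons, ih, List.append_assoc, List.append_assoc, chif_step', List.filter_cons]
    split <;> rename_i h <;>
      simp only [show "0123456789+-.,".toList =
          ['0','1','2','3','4','5','6','7','8','9','+','-','.',','] from rfl,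
        List.mem_cons, List.not_mem_nil, or_false] at h <;>
      simp [h]

-- ===== VERDICT (by name: the statement is the Claim_ definition above) =====
theorem chif_spec : Claim_equal_chif := by
  intro s _
  unfold Spec_chif chif chif_alt
  rw [chif_fold]
  simp
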